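-- pv_equiv track=rewrite | github.com/aanupsharan/algorithms | Stack/LargestRectangularArea.py | prev_smallest_index
-- ===== SOURCE A (Python) =====
-- def prev_smallest_index(hist, n):
--     stack = []
--     ans = n * [-1]
--
--     for i in range(0,n):
--         if len(stack) == 0:
--             stack.insert(0, i)
--             continue
--         while len(stack) != 0 and hist[i] <= hist[stack[0]]:
--             stack.pop(0)
--
--         if len(stack) != 0 and hist[i] > hist[stack[0]]:
--             ans[i] = stack[0]
--         stack.insert(0, i)
--
--     return ans
-- ===== SOURCE B (Python) =====
-- def prev_smallest_index(hist, n):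
--     # Previous strictly-smaller element via answer-chain jumping: instead of a
--     # stack, follow already-computed answers ans[j] backwards (no stack at all).
--     ans = n * [-1]
--     for i in range(0, n):
--         j = i - 1
--         while j >= 0 and hist[j] >= hist[i]:
--             j = ans[j]
--         ans[i] = j
--     return ans
-- ===== Notes on version B (the rewrite author's own statement) =====
-- stated objective: faster
-- what changed: Replaced the front-of-list monotonic stack (with O(n) insert(0)/pop(0)) by stack-free answer-chain jumping: for each bar, follow the already-computed ans[] pointers backwards to the previous strictly-smaller bar.
import Mathlib
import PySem

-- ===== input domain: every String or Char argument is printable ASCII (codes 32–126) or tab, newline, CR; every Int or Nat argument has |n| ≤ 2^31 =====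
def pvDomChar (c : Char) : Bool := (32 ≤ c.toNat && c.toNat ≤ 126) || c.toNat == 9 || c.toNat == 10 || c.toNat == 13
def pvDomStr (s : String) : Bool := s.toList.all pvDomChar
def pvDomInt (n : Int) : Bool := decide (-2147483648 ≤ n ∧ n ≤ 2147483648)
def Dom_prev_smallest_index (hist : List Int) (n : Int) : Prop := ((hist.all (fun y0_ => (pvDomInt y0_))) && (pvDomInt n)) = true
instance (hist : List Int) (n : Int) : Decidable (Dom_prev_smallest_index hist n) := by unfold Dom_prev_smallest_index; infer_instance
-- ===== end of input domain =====

-- B replaces A's front-of-list monotonic stack (O(n) insert(0)/pop(0)) by stack-free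
-- answer-chain jumping (follow already-computed ans[] pointers); return values agree on Pre_.

-- ===== PORT A =====
-- the while loop 'while len(stack) != 0 and hist[i] <= hist[stack[0]]: stack.pop(0)'
def pvPopA (hist : List Int) (hi : Int) : List Int → List Int
  | [] => []
  | s :: st => if hi ≤ PySem.List.pyGetD hist s 0 then pvPopA hist hi st else s :: st

-- one iteration of A's for-loop; state = (stack, ans)
def pvStepA (hist : List Int) : List Int × List Int → Int → List Int × List Int :=
  fun sa i =>
    if sa.1.length = 0 then (i :: sa.1, sa.2)
    else
      let st' := pvPopA hist (PySem.List.pyGetD hist i 0) sa.1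
      (i :: st',
       if st' ≠ [] ∧ PySem.List.pyGetD hist i 0 > PySem.List.pyGetD hist st'.headI 0
       then PySem.List.pySetD sa.2 i st'.headI else sa.2)

def prev_smallest_index (hist : List Int) (n : Int) : List Int :=
  ((PySem.List.pyRange 0 n 1).foldl (pvStepA hist) ([], List.replicate n.toNat (-1))).2

-- ===== PORT B =====
-- the while loop 'while j >= 0 and hist[j] >= hist[i]: j = ans[j]'; fuel i suffices
-- because the jump index strictly decreases from i-1 and stops below 0
def pvJumpB (hist ans : List Int) (hi : Int) : Nat → Int → Int
  | 0, j => j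
  | f + 1, j =>
    if 0 ≤ j ∧ PySem.List.pyGetD hist j 0 ≥ hi then pvJumpB hist ans hi f (PySem.List.pyGetD ans j 0)
    else j

-- one iteration of B's for-loop; state = ans
def pvStepB (hist : List Int) (ans : List Int) (i : Int) : List Int :=
  PySem.List.pySetD ans i (pvJumpB hist ans (PySem.List.pyGetD hist i 0) i.toNat (i - 1))

def prev_smallest_index_alt (hist : List Int) (n : Int) : List Int :=
  (PySem.List.pyRange 0 n 1).foldl (pvStepB hist) (List.replicate n.toNat (-1))

-- ===== PRECONDITION & SPEC =====
-- Pre_ excludes exactly the inputs where Python A raises IndexError (hist[i] for some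
-- i in range(n) beyond hist); for n ≤ 1 no element is read, so those n are admitted.
def Pre_prev_smallest_index (hist : List Int) (n : Int) : Prop :=
  n ≤ (hist.length : Int) ∨ n ≤ 1
instance (hist : List Int) (n : Int) : Decidable (Pre_prev_smallest_index hist n) := by
  unfold Pre_prev_smallest_index; infer_instance

def pvWitness_prev_smallest_index : List Int × Int := ([2, 1, 3, 1, 5], 5)

def Spec_prev_smallest_index (hist : List Int) (n : Int) (out : List Int) : Prop := out = prev_smallest_index_alt hist n
instance (hist : List Int) (n : Int) (out : List Int) : Decidable (Spec_prev_smallest_index hist n out) := by unfold Spec_prev_smallest_index; infer_instance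

-- ===== CLAIM (what is proved, stated in full; the proofs are below) =====
def Claim_equal_prev_smallest_index : Prop := ∀ (hist : List Int) (n : Int), Dom_prev_smallest_index hist n → Pre_prev_smallest_index hist n → Spec_prev_smallest_index hist n (prev_smallest_index hist n)

-- ===== LEMMAS AND PROOFS =====

-- the stack of A, reconstructed from B's answer array: j, ans[j], ans[ans[j]], … while ≥ 0
def pvChain (ans : List Int) : Nat → Int → List Int
  | 0, _ => []
  | f + 1, j => if 0 ≤ j then j :: pvChain ans f (PySem.List.pyGetD ans j 0) else []

-- every entry of B's answer array is in [-1, k)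
def pvInv (ans : List Int) : Prop :=
  ∀ (k : Nat) (h : k < ans.length), -1 ≤ ans[k] ∧ ans[k] < (k : Int)

theorem pvGetD_int (ans : List Int) (j : Int) (h0 : 0 ≤ j) (h1 : j < (ans.length : Int)) :
    PySem.List.pyGetD ans j 0 = ans[j.toNat]'(by omega) :=
  PySem.List.pyGetD_eq_getElem ans 0 h0 h1

theorem pvChain_succ (ans : List Int) (hInv : pvInv ans) :
    ∀ (f : Nat) (j : Int), j < (ans.length : Int) → (j < 0 ∨ (j.toNat : Int) < (f : Int)) →
      pvChain ans (f + 1) j = pvChain ans f j := by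
  intro f
  induction f with
  | zero =>
    intro j hlen hcond
    have hj : j < 0 := by rcases hcond with h | h <;> omega
    simp [pvChain, show ¬ (0:Int) ≤ j by omega]
  | succ f ih =>
    intro j hlen hcond
    by_cases hj : 0 ≤ j
    · have hlt : j.toNat < ans.length := by omega
      have hInvj := hInv j.toNat hlt
      have hg : PySem.List.pyGetD ans j 0 = ans[j.toNat]'hlt := pvGetD_int ans j hj hlen
      show pvChain ans (f + 1 + 1) j = pvChain ans (f + 1) j
      simp only [pvChain, if_pos hj]
      congr 1
      rw [hg]
      apply ih
      · omega
      · by_cases h : (ans[j.toNat]'hlt) < 0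
        · exact Or.inl h
        · right
          rcases hcond with h' | h' <;> omega
    · simp [pvChain, hj]

theorem pvChain_set_high (ans : List Int) (hInv : pvInv ans) (i : Int) (v : Int) (hi : 0 ≤ i) :
    ∀ (f : Nat) (j : Int), j < i → j < (ans.length : Int) →
      pvChain (PySem.List.pySetD ans i v) f j = pvChain ans f j := by
  intro f
  induction f with
  | zero => intro j _ _; rfl
  | succ f ih =>
    intro j hji hlen
    by_cases hj : 0 ≤ j
    · have hlt : j.toNat < ans.length := by omega
      have hInvj := hInv j.toNat hlt
      have hset : PySem.List.pySetD ans i v = ans.set i.toNat v :=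
        PySem.List.pySetD_of_nonneg ans v hi
      have hne : i.toNat ≠ j.toNat := by omega
      have hg : PySem.List.pyGetD (PySem.List.pySetD ans i v) j 0 = ans[j.toNat]'hlt := by
        rw [hset, pvGetD_int _ j hj (by simp; omega)]
        exact List.getElem_set_ne hne _
      have hg2 : PySem.List.pyGetD ans j 0 = ans[j.toNat]'hlt := pvGetD_int ans j hj hlen
      simp only [pvChain, if_pos hj]
      rw [hg, hg2]
      congr 1
      exact ih _ (by omega) (by omega)
    · simp [pvChain, hj]

theorem pvJumpB_le (hist ans : List Int) (hi : Int) (hInv : pvInv ans) :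
    ∀ (f : Nat) (j : Int), j < (ans.length : Int) → pvJumpB hist ans hi f j ≤ j := by
  intro f
  induction f with
  | zero => intro j _; exact le_refl j
  | succ f ih =>
    intro j hlen
    by_cases hc : 0 ≤ j ∧ PySem.List.pyGetD hist j 0 ≥ hi
    · have hlt : j.toNat < ans.length := by omega
      have hInvj := hInv j.toNat hlt
      have hg : PySem.List.pyGetD ans j 0 = ans[j.toNat]'hlt := pvGetD_int ans j hc.1 hlen
      simp only [pvJumpB, if_pos hc, hg]
      have := ih (ans[j.toNat]'hlt) (by omega)
      omega
    · simp only [pvJumpB, if_neg hc]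
      exact le_refl j

theorem pvJumpB_lb (hist ans : List Int) (hi : Int) (hInv : pvInv ans) :
    ∀ (f : Nat) (j : Int), -1 ≤ j → j < (ans.length : Int) → -1 ≤ pvJumpB hist ans hi f j := by
  intro f
  induction f with
  | zero => intro j hlb _; exact hlb
  | succ f ih =>
    intro j hlb hlen
    by_cases hc : 0 ≤ j ∧ PySem.List.pyGetD hist j 0 ≥ hi
    · have hlt : j.toNat < ans.length := by omega
      have hInvj := hInv j.toNat hlt
      have hg : PySem.List.pyGetD ans j 0 = ans[j.toNat]'hlt := pvGetD_int ans j hc.1 hlen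
      simp only [pvJumpB, if_pos hc, hg]
      exact ih _ hInvj.1 (by omega)
    · simp only [pvJumpB, if_neg hc]; exact hlb

theorem pvPop_jump (hist ans : List Int) (hi : Int) (hInv : pvInv ans) :
    ∀ (f : Nat) (j : Int), j < (ans.length : Int) → (j < 0 ∨ (j.toNat : Int) < (f : Int)) →
      pvPopA hist hi (pvChain ans f j) = pvChain ans f (pvJumpB hist ans hi f j) := by
  intro f
  induction f with
  | zero => intro j _ _; rfl
  | succ f ih =>
    intro j hlen hcond
    by_cases hj : 0 ≤ j
    · have hlt : j.toNat < ans.length := by omega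
      have hInvj := hInv j.toNat hlt
      have hg : PySem.List.pyGetD ans j 0 = ans[j.toNat]'hlt := pvGetD_int ans j hj hlen
      by_cases hc : PySem.List.pyGetD hist j 0 ≥ hi
      · have hcand : 0 ≤ j ∧ PySem.List.pyGetD hist j 0 ≥ hi := ⟨hj, hc⟩
        have hih := ih (ans[j.toNat]'hlt) (by omega)
          (by by_cases h : (ans[j.toNat]'hlt) < 0
              · exact Or.inl h
              · right; rcases hcond with h' | h' <;> omega)
        have hjrle : pvJumpB hist ans hi f (ans[j.toNat]'hlt) ≤ ans[j.toNat]'hlt :=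
          pvJumpB_le hist ans hi hInv f _ (by omega)
        simp only [pvChain, if_pos hj, pvPopA, if_pos (show hi ≤ PySem.List.pyGetD hist j 0 from hc),
          pvJumpB, if_pos hcand, hg]
        rw [hih]
        refine (pvChain_succ ans hInv f _ ?_ ?_).symm
        · omega
        · by_cases h : pvJumpB hist ans hi f (ans[j.toNat]'hlt) < 0
          · exact Or.inl h
          · right; rcases hcond with h' | h' <;> omega
      · have hnc : ¬ (0 ≤ j ∧ PySem.List.pyGetD hist j 0 ≥ hi) := fun hh => hc hh.2
        simp only [pvChain, if_pos hj, pvPopA, if_neg (show ¬ hi ≤ PySem.List.pyGetD hist j 0 from hc),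
          pvJumpB, if_neg hnc]
    · simp [pvChain, pvPopA, pvJumpB, hj]

theorem pvPop_head (hist : List Int) (hi : Int) :
    ∀ (st : List Int) (s : Int) (st' : List Int),
      pvPopA hist hi st = s :: st' → PySem.List.pyGetD hist s 0 < hi := by
  intro st
  induction st with
  | nil => intro s st' h; simp [pvPopA] at h
  | cons s0 st0 ih =>
    intro s st' h
    by_cases hc : hi ≤ PySem.List.pyGetD hist s0 0
    · exact ih s st' (by simpa [pvPopA, if_pos hc] using h)
    · simp only [pvPopA, if_neg hc] at h
      cases h
      omega

theorem pvMain (hist : List Int) (N : Nat) :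
    ∀ (m : Nat), m ≤ N →
      ((PySem.List.pyRange 0 (m : Int) 1).foldl (pvStepA hist) ([], List.replicate N (-1))).2
        = (PySem.List.pyRange 0 (m : Int) 1).foldl (pvStepB hist) (List.replicate N (-1)) ∧
      ((PySem.List.pyRange 0 (m : Int) 1).foldl (pvStepA hist) ([], List.replicate N (-1))).1
        = pvChain ((PySem.List.pyRange 0 (m : Int) 1).foldl (pvStepB hist) (List.replicate N (-1))) m ((m : Int) - 1) ∧
      ((PySem.List.pyRange 0 (m : Int) 1).foldl (pvStepB hist) (List.replicate N (-1))).length = N ∧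
      pvInv ((PySem.List.pyRange 0 (m : Int) 1).foldl (pvStepB hist) (List.replicate N (-1))) ∧
      (∀ (k : Nat), m ≤ k → k < N →
        ((PySem.List.pyRange 0 (m : Int) 1).foldl (pvStepB hist) (List.replicate N (-1)))[k]? = some (-1)) := by
  intro m
  induction m with
  | zero =>
    intro _
    rw [show ((0:Nat):Int) = 0 from rfl, PySem.List.pyRange_one_eq_nil (le_refl 0)]
    refine ⟨rfl, rfl, by simp, ?_, ?_⟩
    · intro k h
      simp only [List.foldl_nil, List.getElem_replicate]
      constructor
      · exact le_refl (-1)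
      · omega
    · intro k _ hk
      simp [List.foldl_nil, hk]
  | succ m ih =>
    intro hm1
    have hm : m ≤ N := Nat.le_of_succ_le hm1
    have hmN : m < N := hm1
    obtain ⟨h2, h1, hlen, hinv, hut⟩ := ih hm
    have hrange : PySem.List.pyRange 0 ((m+1 : Nat) : Int) 1
        = PySem.List.pyRange 0 (m : Int) 1 ++ [(m : Int)] := by
      have h : ((m+1:Nat):Int) = (m:Int)+1 := by push_cast; ring
      rw [h]; exact PySem.List.pyRange_one_succ_right (Int.natCast_nonneg m)
    rw [hrange]
    simp only [List.foldl_append, List.foldl_cons, List.foldl_nil]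
    set B := (PySem.List.pyRange 0 (m : Int) 1).foldl (pvStepB hist) (List.replicate N (-1)) with hB
    set S := (PySem.List.pyRange 0 (m : Int) 1).foldl (pvStepA hist) (([] : List Int), List.replicate N (-1)) with hS
    clear hB hS
    set hi := PySem.List.pyGetD hist (m : Int) 0 with hhi
    set jr := pvJumpB hist B hi m ((m : Int) - 1) with hjr
    have hstepB : pvStepB hist B (m : Int) = B.set m jr := by
      rw [pvStepB, PySem.List.pySetD_natCast, hjr, Int.toNat_natCast, hhi]
    have hm1len : ((m:Int) - 1) < (B.length : Int) := by rw [hlen]; omega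
    have hjr_le : jr ≤ (m:Int) - 1 := pvJumpB_le hist B hi hinv m _ hm1len
    have hjr_lb : -1 ≤ jr := pvJumpB_lb hist B hi hinv m _ (by omega) hm1len
    have hjr_len : jr < (B.length : Int) := by omega
    have hpop : pvPopA hist hi (pvChain B m ((m:Int)-1)) = pvChain B m jr := by
      rw [pvPop_jump hist B hi hinv m _ hm1len (by omega), hjr]
    have hgm : B[m]'(by omega) = -1 := by
      have h := hut m (le_refl m) hmN
      rw [List.getElem?_eq_getElem (by omega)] at h
      exact Option.some.injEq _ _ ▸ (by simpa using h)
    have hstepA : pvStepA hist (pvChain B m ((m:Int)-1), S.2) (m:Int) =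
        ((m:Int) :: pvChain B m jr,
         if pvChain B m jr ≠ [] ∧
             PySem.List.pyGetD hist (m:Int) 0 > PySem.List.pyGetD hist (pvChain B m jr).headI 0
         then PySem.List.pySetD S.2 (m:Int) (pvChain B m jr).headI else S.2) := by
      by_cases hst : (pvChain B m ((m:Int)-1)).length = 0
      · have hm0 : m = 0 := by
          cases m with
          | zero => rfl
          | succ mm =>
            exfalso
            have hpos : (0:Int) ≤ ((mm+1:Nat):Int) - 1 := by push_cast; omega
            rw [show pvChain B (mm+1) (((mm+1:Nat):Int) - 1) = _ from rfl] at hst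
            simp only [pvChain, if_pos hpos, List.length_cons] at hst
            omega
        subst hm0
        simp [pvStepA, pvChain]
      · simp only [pvStepA, if_neg hst, ← hhi, hpop]
    have hch1 : ((m+1:Nat):Int) - 1 = (m:Int) := by push_cast; ring
    rw [← Prod.mk.eta (p := S), h1, hstepA, hstepB, hch1]
    rcases hch : pvChain B m jr with _ | ⟨s, rest⟩
    · -- stack empty after the pops: A writes nothing, B writes the -1 already there
      have hjrm1 : jr = -1 := by
        cases m with
        | zero => rw [hjr]; rfl
        | succ mm =>
          by_cases hj0 : (0:Int) ≤ jr
          · simp [pvChain, hj0] at hch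
          · omega
      have hBset : B.set m jr = B := by
        rw [hjrm1, ← hgm]
        exact List.set_getElem_self _
      rw [hBset]
      have hgetm : PySem.List.pyGetD B (m:Int) 0 = -1 := by
        rw [PySem.List.pyGetD_natCast, List.getD_eq_getElem B 0 (by omega), hgm]
      refine ⟨by simpa using h2, ?_, hlen, hinv, ?_⟩
      · simp only [pvChain, if_pos (Int.natCast_nonneg m), hgetm]
        have : pvChain B m (-1) = [] := by
          cases m with
          | zero => rfl
          | succ mm => simp [pvChain]
        rw [this]
      · intro k hk hkN
        exact hut k (by omega) hkN
    · -- stack nonempty: its head is the previous smaller index, both sides write it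
      have hmpos : m ≠ 0 := by
        intro h; subst h; simp [pvChain] at hch
      obtain ⟨mm, rfl⟩ := Nat.exists_eq_succ_of_ne_zero hmpos
      have hj0 : (0:Int) ≤ jr := by
        by_cases h : (0:Int) ≤ jr
        · exact h
        · simp [pvChain, h] at hch
      have hsjr : s = jr := by
        simp only [pvChain, if_pos hj0, List.cons.injEq] at hch
        exact hch.1.symm
      have hhead : PySem.List.pyGetD hist s 0 < hi := by
        apply pvPop_head hist hi (pvChain B (mm+1) (((mm+1:Nat):Int) - 1)) s rest
        rw [hpop, hch]
      have hcond : (s :: rest) ≠ [] ∧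
          PySem.List.pyGetD hist ((mm+1:Nat):Int) 0 > PySem.List.pyGetD hist (s :: rest).headI 0 := by
        refine ⟨by simp, ?_⟩
        simpa [List.headI, hhi] using hhead
      rw [if_pos hcond]
      have hwrite : PySem.List.pySetD S.2 ((mm+1:Nat):Int) (s :: rest).headI = B.set (mm+1) jr := by
        rw [h2, PySem.List.pySetD_natCast]
        simp [List.headI, hsjr]
      have hlen' : (B.set (mm+1) jr).length = N := by rw [List.length_set]; exact hlen
      have hinv' : pvInv (B.set (mm+1) jr) := by
        intro k hk
        by_cases hkm : k = mm+1
        · subst hkm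
          rw [List.getElem_set_self]
          constructor
          · exact hjr_lb
          · omega
        · rw [List.getElem_set_ne (fun h => hkm h.symm)]
          exact hinv k (by simpa using hk)
      refine ⟨hwrite, ?_, hlen', hinv', ?_⟩
      · -- chain over the updated array
        have hget : PySem.List.pyGetD (B.set (mm+1) jr) ((mm+1:Nat):Int) 0 = jr := by
          rw [PySem.List.pyGetD_natCast, List.getD_eq_getElem _ 0 (by rw [List.length_set]; omega)]
          exact List.getElem_set_self _
        have hsethigh : pvChain (B.set (mm+1) jr) (mm+1) jr = pvChain B (mm+1) jr := by
          have := pvChain_set_high B hinv ((mm+1:Nat):Int) jr (Int.natCast_nonneg _)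
            (mm+1) jr (by omega) hjr_len
          rwa [PySem.List.pySetD_natCast] at this
        rw [pvChain, if_pos (Int.natCast_nonneg (mm+1)), hget, hsethigh, hch]
      · intro k hk hkN
        rw [List.getElem?_set_ne (by omega)]
        exact hut k (by omega) hkN

-- ===== VERDICT (by name: the statement is the Claim_ definition above) =====
theorem prev_smallest_index_spec : Claim_equal_prev_smallest_index := by
  intro hist n _ _
  unfold Spec_prev_smallest_index prev_smallest_index prev_smallest_index_alt
  rcases (by omega : n ≤ 0 ∨ 0 < n) with hn | hn
  · rw [PySem.List.pyRange_one_eq_nil hn]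
    rfl
  · have hN : n = (n.toNat : Int) := by omega
    rw [hN]
    simp only [Int.toNat_natCast]
    exact (pvMain hist n.toNat n.toNat (le_refl _)).1
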